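-- pv_equiv track=rewrite | github.com/anindyasdas/documents | LG_Backup/ConvAI/ConvAI/apps/ker/external/srl/srl_parser.py | __post_processor_for_ker
-- ===== SOURCE A (Python) =====
-- def __post_processor_for_ker(pred_dict):
--     """
--     Post process the output and return in th form of dictionary for graph population
--     Args:
--         pred_dict: Output from prediction of SRL after post processing.
--
--     Returns:
--            verb: semantic roles dictionary
--            eg.{'temp': ['completely closing the drawer','when the washer'],
--                'purpose':  ['because of'],
--                'cause':['because of']
--               }
--     """
--     rdf_op = {}
--     rdf_op['temp'] = []
--     rdf_op['purpose'] = []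
--     rdf_op['cause'] = []
--
--     sub_value = pred_dict.values()
--
--     for sub in sub_value:
--         if 'B-ARGM-TMP' in sub:
--             rdf_op['temp'].append(sub['B-ARGM-TMP'])
--         if 'B-ARGM-PRP' in sub:
--             rdf_op['purpose'].append(sub['B-ARGM-PRP'])
--         if 'B-ARGM-CAU' in sub:
--             rdf_op['cause'].append(sub['B-ARGM-CAU'])
--
--     rdf_op['temp'] = '|'.join(rdf_op['temp'])
--     rdf_op['purpose'] = '|'.join(rdf_op['purpose'])
--     rdf_op['cause'] = '|'.join(rdf_op['cause'])
--     return rdf_op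
-- ===== SOURCE B (Python) =====
-- def __post_processor_for_ker(pred_dict):
--     # Inverted traversal: instead of probing each value-dict for three fixed keys,
--     # walk every (key, value) item once and dispatch it through a role lookup table
--     # into a buckets dict, then join each bucket.
--     ROLES = {'B-ARGM-TMP': 'temp', 'B-ARGM-PRP': 'purpose', 'B-ARGM-CAU': 'cause'}
--     buckets = {'temp': [], 'purpose': [], 'cause': []}
--     for sub in pred_dict.values():
--         for key, val in sub.items():
--             role = ROLES.get(key)
--             if role is not None:
--                 buckets[role].append(val)
--     return {role: '|'.join(vs) for role, vs in buckets.items()}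
-- ===== Notes on version B (the rewrite author's own statement) =====
-- stated objective: alternative
-- what changed: Inverts the traversal: instead of probing each value-dict for three fixed role keys, B walks every (key,value) item of every value-dict once and dispatches it through a role lookup table into a buckets dict, joining the buckets at the end.
import Mathlib
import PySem

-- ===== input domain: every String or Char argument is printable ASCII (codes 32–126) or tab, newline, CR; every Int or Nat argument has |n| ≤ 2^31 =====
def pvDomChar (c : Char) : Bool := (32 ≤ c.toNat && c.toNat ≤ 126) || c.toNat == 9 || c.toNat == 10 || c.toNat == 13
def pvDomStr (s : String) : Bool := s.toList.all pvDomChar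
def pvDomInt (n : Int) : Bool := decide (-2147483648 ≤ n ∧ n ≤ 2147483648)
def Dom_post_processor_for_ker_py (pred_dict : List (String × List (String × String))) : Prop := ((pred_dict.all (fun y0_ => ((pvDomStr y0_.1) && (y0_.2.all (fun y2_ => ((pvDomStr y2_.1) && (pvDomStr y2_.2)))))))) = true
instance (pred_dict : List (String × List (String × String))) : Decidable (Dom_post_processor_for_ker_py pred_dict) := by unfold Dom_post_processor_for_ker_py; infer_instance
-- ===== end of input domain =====

-- B inverts the traversal (walk each value-dict's items, dispatch via a role table into a
-- buckets dict) instead of A's three fixed-key membership probes; alternative, same cost.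

-- ===== PORT A =====
-- Inner dicts are assoc lists viewed as Python dicts via PySem.Dict.ofList (overwrite-in-place
-- semantics); 'k in sub' / 'sub[k]' are Dict.contains / Dict.get?.
-- A's heterogeneous rdf_op (list values overwritten by strings at the end) is modelled by the
-- three list accumulators it holds during the loop, joined and packed into the result dict.
def pvStepA (acc : List String × List String × List String) (sub : List (String × String)) :
    List String × List String × List String :=
  let d := PySem.Dict.ofList sub
  let acc := if d.contains "B-ARGM-TMP" then (acc.1 ++ [(d.get? "B-ARGM-TMP").getD ""], acc.2.1, acc.2.2) else acc
  let acc := if d.contains "B-ARGM-PRP" then (acc.1, acc.2.1 ++ [(d.get? "B-ARGM-PRP").getD ""], acc.2.2) else acc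
  if d.contains "B-ARGM-CAU" then (acc.1, acc.2.1, acc.2.2 ++ [(d.get? "B-ARGM-CAU").getD ""]) else acc

def post_processor_for_ker_py (pred_dict : List (String × List (String × String))) : List (String × String) :=
  let sub_value := pred_dict.map (·.2)
  let acc := sub_value.foldl pvStepA ([], [], [])
  [("temp", PySem.Str.join "|" acc.1), ("purpose", PySem.Str.join "|" acc.2.1), ("cause", PySem.Str.join "|" acc.2.2)]

-- ===== PORT B =====
-- B's ROLES lookup table and its buckets dict, both PySem.Dict; the item loop body.
def pvRoles : PySem.Dict String String :=
  PySem.Dict.ofList [("B-ARGM-TMP", "temp"), ("B-ARGM-PRP", "purpose"), ("B-ARGM-CAU", "cause")]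

def pvStepB (buckets : PySem.Dict String (List String)) (kv : String × String) :
    PySem.Dict String (List String) :=
  match pvRoles.get? kv.1 with
  | some role => buckets.modify role [] (· ++ [kv.2])   -- buckets[role].append(val)
  | none => buckets

def post_processor_for_ker_py_alt (pred_dict : List (String × List (String × String))) : List (String × String) :=
  let buckets0 : PySem.Dict String (List String) :=
    PySem.Dict.ofList [("temp", []), ("purpose", []), ("cause", [])]
  let buckets := (pred_dict.map (·.2)).foldl
    (fun b sub => ((PySem.Dict.ofList sub).items).foldl pvStepB b) buckets0
  buckets.items.map (fun p => (p.1, PySem.Str.join "|" p.2))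

-- ===== PRECONDITION & SPEC =====
def Spec_post_processor_for_ker_py (pred_dict : List (String × List (String × String))) (out : List (String × String)) : Prop := out = post_processor_for_ker_py_alt pred_dict
instance (pred_dict : List (String × List (String × String))) (out : List (String × String)) : Decidable (Spec_post_processor_for_ker_py pred_dict out) := by unfold Spec_post_processor_for_ker_py; infer_instance

-- ===== CLAIM (what is proved, stated in full; the proofs are below) =====
def Claim_equal_post_processor_for_ker_py : Prop := ∀ (pred_dict : List (String × List (String × String))), Dom_post_processor_for_ker_py pred_dict → Spec_post_processor_for_ker_py pred_dict (post_processor_for_ker_py pred_dict)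

-- ===== LEMMAS AND PROOFS =====

-- the values of L's pairs whose key is k, in order
def pvSel (L : List (String × String)) (k : String) : List String :=
  (L.filter (fun q => q.1 == k)).map (·.2)

-- B's inner item loop on a canonical three-bucket dict appends each item's value to its bucket
lemma pvFoldB (L : List (String × String)) (t p c : List String) :
    L.foldl pvStepB (PySem.Dict.ofList [("temp", t), ("purpose", p), ("cause", c)]) =
      PySem.Dict.ofList [("temp", t ++ pvSel L "B-ARGM-TMP"),
                         ("purpose", p ++ pvSel L "B-ARGM-PRP"),
                         ("cause", c ++ pvSel L "B-ARGM-CAU")] := by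
  induction L generalizing t p c with
  | nil => simp [pvSel]
  | cons kv rest ih =>
    by_cases hT : kv.1 = "B-ARGM-TMP"
    · simp only [List.foldl_cons, pvStepB, hT]
      rw [show (pvRoles.get? "B-ARGM-TMP") = some "temp" from rfl]
      simp only [show ∀ v, (PySem.Dict.ofList [("temp", t), ("purpose", p), ("cause", c)]).modify "temp" [] (· ++ [v]) = PySem.Dict.ofList [("temp", t ++ [v]), ("purpose", p), ("cause", c)] from fun _ => rfl]
      rw [ih]
      simp [pvSel, hT]
    · by_cases hP : kv.1 = "B-ARGM-PRP"
      · simp only [List.foldl_cons, pvStepB, hP]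
        rw [show (pvRoles.get? "B-ARGM-PRP") = some "purpose" from rfl]
        simp only [show ∀ v, (PySem.Dict.ofList [("temp", t), ("purpose", p), ("cause", c)]).modify "purpose" [] (· ++ [v]) = PySem.Dict.ofList [("temp", t), ("purpose", p ++ [v]), ("cause", c)] from fun _ => rfl]
        rw [ih]
        simp [pvSel, hP]
      · by_cases hC : kv.1 = "B-ARGM-CAU"
        · simp only [List.foldl_cons, pvStepB, hC]
          rw [show (pvRoles.get? "B-ARGM-CAU") = some "cause" from rfl]
          simp only [show ∀ v, (PySem.Dict.ofList [("temp", t), ("purpose", p), ("cause", c)]).modify "cause" [] (· ++ [v]) = PySem.Dict.ofList [("temp", t), ("purpose", p), ("cause", c ++ [v])] from fun _ => rfl]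
          rw [ih]
          simp [pvSel, hC]
        · have h1 : ("B-ARGM-TMP" == kv.1) = false := beq_eq_false_iff_ne.mpr (Ne.symm hT)
          have h2 : ("B-ARGM-PRP" == kv.1) = false := beq_eq_false_iff_ne.mpr (Ne.symm hP)
          have h3 : ("B-ARGM-CAU" == kv.1) = false := beq_eq_false_iff_ne.mpr (Ne.symm hC)
          have hnone : pvRoles.get? kv.1 = none := by
            rw [show pvRoles = PySem.Dict.mk [("B-ARGM-TMP", "temp"), ("B-ARGM-PRP", "purpose"), ("B-ARGM-CAU", "cause")] from rfl]
            rw [PySem.Dict.get?_mk_cons, PySem.Dict.get?_mk_cons, PySem.Dict.get?_mk_cons, h1, h2, h3]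
            rfl
          simp only [List.foldl_cons, pvStepB, hnone]
          rw [ih]
          simp [pvSel, beq_eq_false_iff_ne.mpr hT,
            beq_eq_false_iff_ne.mpr hP, beq_eq_false_iff_ne.mpr hC]

-- on a key-Nodup pair list, selecting by key k yields exactly the first-match lookup value
lemma pvSel_nodup (L : List (String × String)) (h : (L.map (·.1)).Nodup) (k : String) :
    pvSel L k = ((PySem.Dict.mk L).get? k).toList := by
  induction L with
  | nil => simp [pvSel, PySem.Dict.get?]
  | cons q rest ih =>
    obtain ⟨qk, qv⟩ := q
    simp only [List.map_cons, List.nodup_cons] at h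
    rw [PySem.Dict.get?_mk_cons]
    by_cases hk : qk = k
    · simp [pvSel, hk]
      intro a b hab hak
      exact h.1 (by rw [hk, ← hak]; exact List.mem_map_of_mem (f := fun x => x.1) hab)
    · have hbf : (qk == k) = false := beq_eq_false_iff_ne.mpr hk
      simp only [pvSel, List.filter_cons, hbf, Bool.false_eq_true, if_false]
      exact ih h.2

-- A's loop over all value-dicts computes, per role, the filterMap of that role's lookups
lemma pvFoldA (vals : List (List (String × String))) (t p c : List String) :
    vals.foldl pvStepA (t, p, c) =
      (t ++ vals.filterMap (fun sub => (PySem.Dict.ofList sub).get? "B-ARGM-TMP"),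
       p ++ vals.filterMap (fun sub => (PySem.Dict.ofList sub).get? "B-ARGM-PRP"),
       c ++ vals.filterMap (fun sub => (PySem.Dict.ofList sub).get? "B-ARGM-CAU")) := by
  induction vals generalizing t p c with
  | nil => simp
  | cons sub rest ih =>
    simp only [List.foldl_cons, List.filterMap_cons, pvStepA]
    rcases hT : (PySem.Dict.ofList sub).get? "B-ARGM-TMP" with _ | vT <;>
    rcases hP : (PySem.Dict.ofList sub).get? "B-ARGM-PRP" with _ | vP <;>
    rcases hC : (PySem.Dict.ofList sub).get? "B-ARGM-CAU" with _ | vC <;>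
      simp [PySem.Dict.contains_eq_isSome_get?, hT, hP, hC, ih]

-- B's nested loop, flattened: each value-dict contributes its per-role lookup values
lemma pvFoldB_all (vals : List (List (String × String))) (t p c : List String) :
    vals.foldl (fun b sub => ((PySem.Dict.ofList sub).items).foldl pvStepB b)
        (PySem.Dict.ofList [("temp", t), ("purpose", p), ("cause", c)]) =
      PySem.Dict.ofList
        [("temp", t ++ vals.filterMap (fun sub => (PySem.Dict.ofList sub).get? "B-ARGM-TMP")),
         ("purpose", p ++ vals.filterMap (fun sub => (PySem.Dict.ofList sub).get? "B-ARGM-PRP")),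
         ("cause", c ++ vals.filterMap (fun sub => (PySem.Dict.ofList sub).get? "B-ARGM-CAU"))] := by
  induction vals generalizing t p c with
  | nil => simp
  | cons sub rest ih =>
    have hnd : (((PySem.Dict.ofList sub).items).map (·.1)).Nodup :=
      PySem.Dict.nodup_keys_ofList sub
    have hmk : PySem.Dict.mk ((PySem.Dict.ofList sub).items) = PySem.Dict.ofList sub := rfl
    simp only [List.foldl_cons, List.filterMap_cons, pvFoldB, pvSel_nodup _ hnd, hmk, ih]
    rcases hT : (PySem.Dict.ofList sub).get? "B-ARGM-TMP" with _ | vT <;>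
    rcases hP : (PySem.Dict.ofList sub).get? "B-ARGM-PRP" with _ | vP <;>
    rcases hC : (PySem.Dict.ofList sub).get? "B-ARGM-CAU" with _ | vC <;>
      simp

-- ===== VERDICT (by name: the statement is the Claim_ definition above) =====
theorem post_processor_for_ker_py_spec : Claim_equal_post_processor_for_ker_py := by
  intro pred_dict _
  unfold Spec_post_processor_for_ker_py
  simp only [post_processor_for_ker_py, post_processor_for_ker_py_alt]
  rw [pvFoldB_all, pvFoldA]
  rfl
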